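-- pv_equiv track=rewrite | github.com/mansetagunj/Computer-Security | Vigenere Cipher Hack/hackVigenere_guma9188.py | getList_MaxKey_inDict
-- ===== SOURCE A (Python) =====
-- import re, operator
--
-- def getList_MaxKey_inDict(inDict):
--     maxKey_list = []
--     value_n_minus_1 = 0
--     inDict = sorted(inDict.items(), key=operator.itemgetter(1), reverse=True)
--     for key, value in inDict:
--         if value >= value_n_minus_1:
--             maxKey_list.append(key);
--         else:
--             break;
--         value_n_minus_1 = value
--     return maxKey_list
-- ===== SOURCE B (Python) =====
-- def getList_MaxKey_inDict(inDict):
--     best = None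
--     keys = []
--     for key, value in inDict.items():
--         if best is None or value > best:
--             best = value
--             keys = [key]
--         elif value == best:
--             keys.append(key)
--     return keys
-- ===== Notes on version B (the rewrite author's own statement) =====
-- stated objective: alternative
-- what changed: B replaces A's sort-by-value-descending followed by a take-while prefix scan with a single unsorted pass that tracks the running maximum value and the list of keys attaining it.
-- intended difference: On nonempty dicts whose values are all negative, A returns [] (its prefix scan is cut off by the 0 initialiser of value_n_minus_1), while B returns the keys attaining the maximum value, which is the intended result of a max-keys function. — e.g. on getList_MaxKey_inDict([("a", -1)]): A returns [], B returns ["a"]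
import Mathlib
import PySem

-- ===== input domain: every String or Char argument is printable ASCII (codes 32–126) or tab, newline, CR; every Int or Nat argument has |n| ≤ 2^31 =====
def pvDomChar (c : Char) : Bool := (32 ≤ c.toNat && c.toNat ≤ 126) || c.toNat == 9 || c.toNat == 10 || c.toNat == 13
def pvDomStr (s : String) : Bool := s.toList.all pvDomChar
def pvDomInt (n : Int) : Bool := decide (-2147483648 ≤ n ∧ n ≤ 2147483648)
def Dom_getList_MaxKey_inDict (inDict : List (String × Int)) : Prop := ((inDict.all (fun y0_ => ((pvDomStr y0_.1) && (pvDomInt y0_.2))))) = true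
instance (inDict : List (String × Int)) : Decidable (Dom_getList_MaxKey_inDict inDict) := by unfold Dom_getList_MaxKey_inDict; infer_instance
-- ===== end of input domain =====

-- B replaces A's sort-descending-then-take-prefix with a single max-tracking pass
-- (objective: alternative); on all-negative dicts A and B intentionally differ (see D_ below).

-- ===== PORT A =====
-- the for-loop of A: walks the value-descending sorted items, appending keys while
-- value >= previous value, breaking otherwise
def pvALoop (acc : List String) (prev : Int) : List (String × Int) → List String
  | [] => acc
  | (k, v) :: rest => if prev ≤ v then pvALoop (acc ++ [k]) v rest else acc

def getList_MaxKey_inDict (inDict : List (String × Int)) : List String :=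
  pvALoop [] 0 (PySem.List.sorted (PySem.Dict.ofList inDict).items (fun p => p.2) true)

-- ===== PORT B =====
-- the for-loop of B: one pass keeping the best value seen and the keys attaining it
def pvBLoop (best : Option Int) (keys : List String) : List (String × Int) → Option Int × List String
  | [] => (best, keys)
  | (k, v) :: rest =>
    match best with
    | none => pvBLoop (some v) [k] rest
    | some b =>
      if b < v then pvBLoop (some v) [k] rest
      else if v = b then pvBLoop (some b) (keys ++ [k]) rest
      else pvBLoop (some b) keys rest

def getList_MaxKey_inDict_alt (inDict : List (String × Int)) : List String :=
  (pvBLoop none [] (PySem.Dict.ofList inDict).items).2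

-- ===== PRECONDITION & SPEC =====
-- On nonempty dicts whose values are all negative, A returns [] (its prefix scan is cut off
-- by the 0 initialiser of value_n_minus_1), while B returns the keys attaining the maximum
-- value, which is the intended result of a max-keys function.
def D_getList_MaxKey_inDict (inDict : List (String × Int)) : Prop :=
  (PySem.Dict.ofList inDict).items ≠ [] ∧ ∀ p ∈ (PySem.Dict.ofList inDict).items, p.2 < 0
instance (inDict : List (String × Int)) : Decidable (D_getList_MaxKey_inDict inDict) := by
  unfold D_getList_MaxKey_inDict; infer_instance

def Spec_getList_MaxKey_inDict (inDict : List (String × Int)) (out : List String) : Prop :=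
  ¬ D_getList_MaxKey_inDict inDict → out = getList_MaxKey_inDict_alt inDict
instance (inDict : List (String × Int)) (out : List String) : Decidable (Spec_getList_MaxKey_inDict inDict out) := by
  unfold Spec_getList_MaxKey_inDict; infer_instance

def pvDiffWitness_getList_MaxKey_inDict : List (String × Int) := [("a", -1)]
def pvDiffWitnessOut_getList_MaxKey_inDict : (List String) × (List String) := ([], ["a"])

-- ===== CLAIM (what is proved, stated in full; the proofs are below) =====
def Claim_unchanged_getList_MaxKey_inDict : Prop := ∀ (inDict : List (String × Int)), Dom_getList_MaxKey_inDict inDict → Spec_getList_MaxKey_inDict inDict (getList_MaxKey_inDict inDict)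
def Claim_changed_getList_MaxKey_inDict : Prop := Dom_getList_MaxKey_inDict (pvDiffWitness_getList_MaxKey_inDict) ∧ D_getList_MaxKey_inDict (pvDiffWitness_getList_MaxKey_inDict) ∧ getList_MaxKey_inDict (pvDiffWitness_getList_MaxKey_inDict) = pvDiffWitnessOut_getList_MaxKey_inDict.1 ∧ getList_MaxKey_inDict_alt (pvDiffWitness_getList_MaxKey_inDict) = pvDiffWitnessOut_getList_MaxKey_inDict.2 ∧ pvDiffWitnessOut_getList_MaxKey_inDict.1 ≠ pvDiffWitnessOut_getList_MaxKey_inDict.2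
def Claim_exact_getList_MaxKey_inDict : Prop := ∀ (inDict : List (String × Int)), Dom_getList_MaxKey_inDict inDict → D_getList_MaxKey_inDict inDict → getList_MaxKey_inDict inDict ≠ getList_MaxKey_inDict_alt inDict

-- ===== LEMMAS AND PROOFS =====

-- maximum of b and the values of ys (the value pvBLoop's best tracks)
def pvFmax (b : Int) (ys : List (String × Int)) : Int :=
  ys.foldl (fun b y => max b y.2) b

theorem pvFmax_cons (b : Int) (y : String × Int) (ys : List (String × Int)) :
    pvFmax b (y :: ys) = pvFmax (max b y.2) ys := rfl

theorem le_pvFmax_self (b : Int) (ys : List (String × Int)) : b ≤ pvFmax b ys := by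
  induction ys generalizing b with
  | nil => simp [pvFmax]
  | cons y ys ih =>
    rw [pvFmax_cons]
    exact le_trans (le_max_left _ _) (ih _)

theorem le_pvFmax_of_mem (b : Int) (ys : List (String × Int)) :
    ∀ y ∈ ys, y.2 ≤ pvFmax b ys := by
  induction ys generalizing b with
  | nil => intro y h; simp at h
  | cons z ys ih =>
    intro y hy
    rcases List.mem_cons.mp hy with h | h
    · subst h; rw [pvFmax_cons]
      exact le_trans (le_max_right _ _) (le_pvFmax_self _ _)
    · rw [pvFmax_cons]; exact ih _ y h

theorem pvFmax_mem (b : Int) (ys : List (String × Int)) :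
    pvFmax b ys = b ∨ ∃ y ∈ ys, pvFmax b ys = y.2 := by
  induction ys generalizing b with
  | nil => left; rfl
  | cons z ys ih =>
    rw [pvFmax_cons]
    rcases ih (max b z.2) with h | ⟨y, hy, h⟩
    · rcases max_choice b z.2 with hm | hm
      · left; rw [h, hm]
      · right; exact ⟨z, List.mem_cons_self, by rw [h, hm]⟩
    · right; exact ⟨y, List.mem_cons_of_mem _ hy, h⟩

-- pvBLoop with a running best: the final best is the max, the final keys are the keys
-- attaining it (prefixed by the carried keys iff the carried best already is the max)
theorem pvBLoop_split (ys : List (String × Int)) :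
    ∀ (b : Int) (keys : List String),
      pvBLoop (some b) keys ys =
        (some (pvFmax b ys),
         (if b = pvFmax b ys then keys else []) ++
           (ys.filter (fun y => y.2 == pvFmax b ys)).map (·.1)) := by
  induction ys with
  | nil => intro b keys; simp [pvBLoop, pvFmax]
  | cons z ys ih =>
    intro b keys
    obtain ⟨k, v⟩ := z
    by_cases hlt : b < v
    · rw [show pvBLoop (some b) keys ((k, v) :: ys) = pvBLoop (some v) [k] ys by
            simp [pvBLoop, hlt],
          ih v [k], pvFmax_cons, max_eq_right (le_of_lt hlt)]
      have hvle := le_pvFmax_self v ys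
      set M := pvFmax v ys with hMdef
      rw [if_neg (show ¬ b = M by omega), List.filter_cons]
      by_cases hv : v = M
      · simp [hv]
      · simp [hv, show ((v == M) = true) = False by simpa using hv]
    · by_cases heq : v = b
      · rw [show pvBLoop (some b) keys ((k, v) :: ys) = pvBLoop (some b) (keys ++ [k]) ys by
              simp [pvBLoop, heq],
            ih b (keys ++ [k]), pvFmax_cons, max_eq_left (by omega), List.filter_cons]
        set M := pvFmax b ys with hMdef
        subst heq
        by_cases hb : v = M
        · simp [hb]
        · simp [hb, show ((v == M) = true) = False by simpa using hb]
      · rw [show pvBLoop (some b) keys ((k, v) :: ys) = pvBLoop (some b) keys ys by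
              simp [pvBLoop, hlt, heq],
            ih b keys, pvFmax_cons, max_eq_left (by omega), List.filter_cons]
        have hble := le_pvFmax_self b ys
        set M := pvFmax b ys with hMdef
        simp [show ((v == M) = true) = False by simp; omega]

-- the keys B collects on a nonempty list: the keys of maximum value, in input order
theorem pvBLoop_run (k : String) (v : Int) (rest : List (String × Int)) :
    (pvBLoop none [] ((k, v) :: rest)).2
      = (((k, v) :: rest).filter (fun y => y.2 == pvFmax v rest)).map (·.1) := by
  rw [show pvBLoop none [] ((k, v) :: rest) = pvBLoop (some v) [k] rest from rfl,
      pvBLoop_split rest v [k]]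
  have hvM := le_pvFmax_self v rest
  set M := pvFmax v rest with hMdef
  rw [List.filter_cons]
  by_cases hv : v = M
  · simp [hv]
  · simp [hv, show ((v == M) = true) = False by simpa using hv]

-- A's loop over a value-descending list whose values are all ≤ prev collects exactly the
-- keys of value prev
theorem pvALoop_run (s : List (String × Int))
    (hs : s.Pairwise (fun a b => b.2 ≤ a.2)) (m : Int)
    (hle : ∀ y ∈ s, y.2 ≤ m) :
    ∀ acc, pvALoop acc m s = acc ++ (s.filter (fun y => y.2 == m)).map (·.1) := by
  induction s with
  | nil => intro acc; simp [pvALoop]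
  | cons z s ih =>
    intro acc
    obtain ⟨k, v⟩ := z
    have hvm : v ≤ m := hle (k, v) List.mem_cons_self
    by_cases hge : m ≤ v
    · have hv : v = m := le_antisymm hvm hge
      rw [show pvALoop acc m ((k, v) :: s) = pvALoop (acc ++ [k]) v s by
            simp [pvALoop, hge]]
      subst hv
      rw [ih (List.Pairwise.of_cons hs) (fun y hy => (List.pairwise_cons.mp hs).1 y hy) (acc ++ [k])]
      rw [List.filter_cons]
      simp
    · rw [show pvALoop acc m ((k, v) :: s) = acc by simp [pvALoop, hge]]
      have hnil : (((k, v) :: s).filter (fun y => y.2 == m)) = [] := by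
        rw [List.filter_eq_nil_iff]
        intro y hy
        simp only [beq_iff_eq]
        rcases List.mem_cons.mp hy with h | h
        · subst h; omega
        · have := (List.pairwise_cons.mp hs).1 y h
          omega
      rw [hnil]; simp

-- insertBy with the descending comparator preserves descending order
theorem pvInsertBy_pairwise (x : String × Int) (acc : List (String × Int))
    (hacc : acc.Pairwise (fun a b => b.2 ≤ a.2)) :
    (PySem.List.insertBy (fun a b => decide (b.2 < a.2)) x acc).Pairwise
      (fun a b => b.2 ≤ a.2) := by
  induction acc with
  | nil => simp [PySem.List.insertBy]
  | cons y ys ih =>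
    by_cases h : y.2 < x.2
    · rw [show PySem.List.insertBy (fun a b => decide (b.2 < a.2)) x (y :: ys) = x :: y :: ys by
            simp [PySem.List.insertBy, h]]
      refine List.pairwise_cons.mpr ⟨?_, hacc⟩
      intro z hz
      rcases List.mem_cons.mp hz with hzy | hzs
      · subst hzy; omega
      · have := (List.pairwise_cons.mp hacc).1 z hzs; omega
    · rw [show PySem.List.insertBy (fun a b => decide (b.2 < a.2)) x (y :: ys)
            = y :: PySem.List.insertBy (fun a b => decide (b.2 < a.2)) x ys by
            simp [PySem.List.insertBy, h]]
      refine List.pairwise_cons.mpr ⟨?_, ih (List.Pairwise.of_cons hacc)⟩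
      intro z hz
      rcases (PySem.List.mem_insertBy _ x z ys).mp hz with hzx | hzs
      · subst hzx; omega
      · exact (List.pairwise_cons.mp hacc).1 z hzs

-- STABILITY at the maximum: inserting x into a descending list leaves the filtered
-- m-elements in place and appends x iff it has value m
theorem pvInsertBy_filter (x : String × Int) (m : Int) (acc : List (String × Int))
    (hacc : acc.Pairwise (fun a b => b.2 ≤ a.2)) :
    (PySem.List.insertBy (fun a b => decide (b.2 < a.2)) x acc).filter (fun y => y.2 == m)
      = acc.filter (fun y => y.2 == m) ++ if x.2 == m then [x] else [] := by
  induction acc with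
  | nil => simp [PySem.List.insertBy, List.filter_cons]
  | cons y ys ih =>
    by_cases h : y.2 < x.2
    · rw [show PySem.List.insertBy (fun a b => decide (b.2 < a.2)) x (y :: ys) = x :: y :: ys by
            simp [PySem.List.insertBy, h]]
      by_cases hx : x.2 = m
      · have hnil : ((y :: ys).filter (fun y => y.2 == m)) = [] := by
          rw [List.filter_eq_nil_iff]
          intro z hz
          simp only [beq_iff_eq]
          rcases List.mem_cons.mp hz with hzy | hzs
          · subst hzy; omega
          · have := (List.pairwise_cons.mp hacc).1 z hzs; omega
        rw [List.filter_cons]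
        simp only [hx, beq_self_eq_true, if_pos]
        rw [hnil]
        simp
      · have hxb : ¬ ((x.2 == m) = true) := by simpa using hx
        rw [List.filter_cons]
        simp [hxb]
    · rw [show PySem.List.insertBy (fun a b => decide (b.2 < a.2)) x (y :: ys)
            = y :: PySem.List.insertBy (fun a b => decide (b.2 < a.2)) x ys by
            simp [PySem.List.insertBy, h]]
      rw [List.filter_cons, List.filter_cons, ih (List.Pairwise.of_cons hacc)]
      by_cases hy : (y.2 == m) = true
      · simp [hy]
      · simp [hy]

-- the stable sort keeps the m-elements in input order
theorem pvSort_filter_stable (ys : List (String × Int)) (m : Int) :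
    ∀ acc, acc.Pairwise (fun a b => b.2 ≤ a.2) →
      (ys.foldl (fun a x => PySem.List.insertBy (fun a b => decide (b.2 < a.2)) x a) acc).filter
          (fun y => y.2 == m)
        = acc.filter (fun y => y.2 == m) ++ ys.filter (fun y => y.2 == m) := by
  induction ys with
  | nil => intro acc _; simp
  | cons z ys ih =>
    intro acc hacc
    rw [List.foldl_cons, ih _ (pvInsertBy_pairwise z acc hacc),
        pvInsertBy_filter z m acc hacc, List.filter_cons]
    by_cases hz : (z.2 == m) = true
    · simp [hz]
    · simp [hz]

-- A's side on a nonempty item list with a nonnegative maximum equals the max-keys list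
theorem pvA_run_pos (k : String) (v : Int) (rest : List (String × Int))
    (hM0 : 0 ≤ pvFmax v rest) :
    pvALoop [] 0 (PySem.List.sorted ((k, v) :: rest) (fun p => p.2) true)
      = (((k, v) :: rest).filter (fun y => y.2 == pvFmax v rest)).map (·.1) := by
  set M := pvFmax v rest with hMdef
  have hvM : v ≤ M := le_pvFmax_self v rest
  have hMub : ∀ y ∈ (k, v) :: rest, y.2 ≤ M := by
    intro y hy
    rcases List.mem_cons.mp hy with h | h
    · subst h; exact hvM
    · exact le_pvFmax_of_mem v rest y h
  have hMmem : M = v ∨ ∃ y ∈ rest, M = y.2 := pvFmax_mem v rest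
  obtain ⟨m0, t, hsort⟩ : ∃ m0 t,
      PySem.List.sorted ((k, v) :: rest) (fun p => p.2) true = m0 :: t := by
    cases hs : PySem.List.sorted ((k, v) :: rest) (fun p => p.2) true with
    | nil =>
      exact absurd ((PySem.List.sorted_eq_nil_iff ((k, v) :: rest) (fun p => p.2) true).mp hs)
        (by simp)
    | cons a b => exact ⟨a, b, rfl⟩
  obtain ⟨k0, mv⟩ := m0
  have hhead : ∀ y ∈ (k, v) :: rest, y.2 ≤ mv :=
    PySem.List.key_head_sorted_rev_ge ((k, v) :: rest) (fun p => p.2) hsort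
  have hm0mem : (k0, mv) ∈ (k, v) :: rest := by
    have : (k0, mv) ∈ PySem.List.sorted ((k, v) :: rest) (fun p => p.2) true := by
      rw [hsort]; exact List.mem_cons_self
    exact (PySem.List.mem_sorted ((k, v) :: rest) (fun p => p.2) true (k0, mv)).mp this
  have hm0M : mv = M := by
    have h1 : mv ≤ M := hMub (k0, mv) hm0mem
    have h2 : M ≤ mv := by
      rcases hMmem with h | ⟨y, hy, h⟩
      · exact h ▸ hhead (k, v) List.mem_cons_self
      · exact h ▸ hhead y (List.mem_cons_of_mem _ hy)
    omega
  have hpair : ((k0, mv) :: t).Pairwise (fun a b => b.2 ≤ a.2) := by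
    have := PySem.List.sorted_pairwise_rev ((k, v) :: rest) (fun p => p.2)
    rwa [hsort] at this
  have hfilt : (((k0, mv) :: t).filter (fun y => y.2 == M))
      = (((k, v) :: rest).filter (fun y => y.2 == M)) := by
    rw [← hsort, PySem.List.sorted_rev_eq_foldl_insertBy,
        pvSort_filter_stable ((k, v) :: rest) M [] (by simp)]
    simp
  rw [hsort]
  subst hm0M
  rw [show pvALoop [] 0 ((k0, M) :: t) = pvALoop ([] ++ [k0]) M t by
        simp only [pvALoop]
        rw [if_pos hM0]]
  rw [pvALoop_run t (List.Pairwise.of_cons hpair) M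
        (fun y hy => (List.pairwise_cons.mp hpair).1 y hy) ([] ++ [k0])]
  have hh : ([] ++ [k0]) ++ (t.filter (fun y => y.2 == M)).map (·.1)
      = ((((k0, M) :: t)).filter (fun y => y.2 == M)).map (·.1) := by
    rw [List.filter_cons]; simp
  rw [hh, hfilt]

-- ===== VERDICT (by name: the statements are the Claim_ definitions above) =====
theorem getList_MaxKey_inDict_spec : Claim_unchanged_getList_MaxKey_inDict := by
  intro inDict _ hnD
  unfold getList_MaxKey_inDict getList_MaxKey_inDict_alt
  unfold D_getList_MaxKey_inDict at hnD
  cases hys : (PySem.Dict.ofList inDict).items with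
  | nil => simp [PySem.List.sorted_rev_eq_foldl_insertBy, pvALoop, pvBLoop]
  | cons z rest =>
    obtain ⟨k, v⟩ := z
    have hpos : 0 ≤ pvFmax v rest := by
      rw [hys] at hnD
      rcases not_and_or.mp hnD with h | h
      · exact absurd (by simp) h
      · push Not at h
        obtain ⟨y, hy, hyv⟩ := h
        rcases List.mem_cons.mp hy with hk | hk
        · have := le_pvFmax_self v rest
          subst hk; omega
        · have := le_pvFmax_of_mem v rest y hk
          omega
    rw [pvBLoop_run, pvA_run_pos k v rest hpos]

theorem getList_MaxKey_inDict_changed : Claim_changed_getList_MaxKey_inDict := by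
  unfold Claim_changed_getList_MaxKey_inDict; decide

theorem getList_MaxKey_inDict_tight : Claim_exact_getList_MaxKey_inDict := by
  intro inDict _ hD
  unfold getList_MaxKey_inDict getList_MaxKey_inDict_alt
  obtain ⟨hne, hneg⟩ := hD
  cases hys : (PySem.Dict.ofList inDict).items with
  | nil => exact absurd hys hne
  | cons z rest =>
    obtain ⟨k, v⟩ := z
    rw [hys] at hneg
    -- A side is []
    have hAnil : pvALoop [] 0 (PySem.List.sorted ((k, v) :: rest) (fun p => p.2) true) = [] := by
      obtain ⟨m0, t, hsort⟩ : ∃ m0 t,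
          PySem.List.sorted ((k, v) :: rest) (fun p => p.2) true = m0 :: t := by
        cases hs : PySem.List.sorted ((k, v) :: rest) (fun p => p.2) true with
        | nil =>
          exact absurd ((PySem.List.sorted_eq_nil_iff ((k, v) :: rest) (fun p => p.2) true).mp hs)
            (by simp)
        | cons a b => exact ⟨a, b, rfl⟩
      obtain ⟨k0, mv⟩ := m0
      have hm0mem : (k0, mv) ∈ (k, v) :: rest := by
        have : (k0, mv) ∈ PySem.List.sorted ((k, v) :: rest) (fun p => p.2) true := by
          rw [hsort]; exact List.mem_cons_self
        exact (PySem.List.mem_sorted ((k, v) :: rest) (fun p => p.2) true (k0, mv)).mp this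
      have hmvneg : mv < 0 := hneg (k0, mv) hm0mem
      rw [hsort]
      simp only [pvALoop]
      rw [if_neg (by omega)]
    -- B side is nonempty
    have hBne : (pvBLoop none [] ((k, v) :: rest)).2 ≠ [] := by
      rw [pvBLoop_run]
      set M := pvFmax v rest with hMdef
      have hMmem : ∃ y ∈ (k, v) :: rest, y.2 = M := by
        rcases pvFmax_mem v rest with h | ⟨y, hy, h⟩
        · exact ⟨(k, v), List.mem_cons_self, h.symm⟩
        · exact ⟨y, List.mem_cons_of_mem _ hy, h.symm⟩
      obtain ⟨y, hy, hyM⟩ := hMmem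
      have : y ∈ ((k, v) :: rest).filter (fun y => y.2 == M) :=
        List.mem_filter.mpr ⟨hy, by simpa using hyM⟩
      intro hcontra
      rw [List.map_eq_nil_iff] at hcontra
      rw [hcontra] at this
      simp at this
    rw [hAnil]
    exact fun h => hBne h.symm
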